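-- pv_equiv track=rewrite | github.com/rosie-yoon/foundstudio | app.py | extract_opening_words
-- ===== SOURCE A (Python) =====
-- OPENING_WORDS_THRESHOLD = 3
--
-- def extract_opening_words(lyrics):
--     """가사에서 첫 번째 Verse의 처음 3단어 추출"""
--     lines = lyrics.split('\n')
--     verse_words = []
--     in_first_verse = False
--
--     for line in lines:
--         stripped = line.strip()
--
--         if '[Verse 1]' in stripped:
--             in_first_verse = True
--             continue
--
--         if in_first_verse:
--             if stripped.startswith('[') and 'Verse' not in stripped:
--                 break
--             if stripped and not stripped.startswith('['):
--                 words = stripped.lower().split()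
--                 verse_words.extend(words)
--
--                 if len(verse_words) >= OPENING_WORDS_THRESHOLD:
--                     return ' '.join(verse_words[:OPENING_WORDS_THRESHOLD])
--
--     return ' '.join(verse_words[:OPENING_WORDS_THRESHOLD])
-- ===== SOURCE B (Python) =====
-- def extract_opening_words(lyrics):
--     stripped = [ln.strip() for ln in lyrics.split('\n')]
--     headers = [k for k, s in enumerate(stripped) if '[Verse 1]' in s]
--     if not headers:
--         return ''
--     body = stripped[headers[0] + 1:]
--     breaks = [k for k, s in enumerate(body)
--               if s.startswith('[') and 'Verse' not in s]
--     verse = body[:breaks[0]] if breaks else body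
--     words = [w for s in verse
--              if s and not s.startswith('[') and '[Verse 1]' not in s
--              for w in s.lower().split()]
--     return ' '.join(words[:3])
-- ===== Notes on version B (the rewrite author's own statement) =====
-- stated objective: alternative
-- what changed: B replaces A's stateful scan (flag, continue/break, early return) with a declarative pipeline: strip all lines once, compute the list of header indices and the list of break indices with enumerate-comprehensions, slice the verse out by those indices, and get the words with a single filter+flatten comprehension sliced to 3 at the end.
import Mathlib
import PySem

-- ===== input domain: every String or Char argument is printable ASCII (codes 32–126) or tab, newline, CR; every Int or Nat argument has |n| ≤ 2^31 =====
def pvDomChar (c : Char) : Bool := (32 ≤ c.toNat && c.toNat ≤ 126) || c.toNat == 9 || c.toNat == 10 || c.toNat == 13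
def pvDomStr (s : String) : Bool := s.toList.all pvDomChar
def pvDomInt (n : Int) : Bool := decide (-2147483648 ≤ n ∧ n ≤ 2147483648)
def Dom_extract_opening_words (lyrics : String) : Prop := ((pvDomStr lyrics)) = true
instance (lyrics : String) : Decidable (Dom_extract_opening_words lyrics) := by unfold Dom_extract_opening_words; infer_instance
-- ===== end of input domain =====

-- B replaces A's stateful scan with an index-pipeline: strip once, compute header/break
-- index lists by enumerate-comprehensions, slice the verse out, filter+flatten the words
-- (objective: alternative decomposition, same cost).

-- ===== PORT A =====
-- the for-loop of A: state = (verse_words, in_first_verse); early return modelled by returning the String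
def pvALoop : List (List Char) → List (List Char) → Bool → String
  | [], vw, _ => String.ofList (PySem.Chars.join [' '] (PySem.List.slice vw none (some 3)))
  | line :: rest, vw, inv =>
    let stripped := PySem.Chars.strip line
    if PySem.Chars.isIn "[Verse 1]".toList stripped then
      pvALoop rest vw true
    else if inv then
      if PySem.Chars.startswith stripped "[".toList && !(PySem.Chars.isIn "Verse".toList stripped) then
        String.ofList (PySem.Chars.join [' '] (PySem.List.slice vw none (some 3)))     -- break
      else if stripped ≠ [] && !(PySem.Chars.startswith stripped "[".toList) then
        let vw' := vw ++ PySem.Chars.split₀ (PySem.Chars.lower stripped)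
        if 3 ≤ vw'.length then
          String.ofList (PySem.Chars.join [' '] (PySem.List.slice vw' none (some 3)))  -- early return
        else
          pvALoop rest vw' inv
      else
        pvALoop rest vw inv
    else
      pvALoop rest vw inv

def extract_opening_words (lyrics : String) : String :=
  pvALoop (PySem.Chars.splitOn lyrics.toList "\n".toList) [] false

-- ===== PORT B =====
-- named versions of B's comprehension predicates / word extractor
def pvQH (s : List Char) : Bool := PySem.Chars.isIn "[Verse 1]".toList s
def pvQB (s : List Char) : Bool := PySem.Chars.startswith s "[".toList && !(PySem.Chars.isIn "Verse".toList s)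
def pvKeep (s : List Char) : Bool := !s.isEmpty && !(PySem.Chars.startswith s "[".toList) && !(pvQH s)
def pvF (s : List Char) : List (List Char) := PySem.Chars.split₀ (PySem.Chars.lower s)

-- '[k for k, s in enumerate(xs) if q(s)]'
def pvIdxs (q : List Char → Bool) (xs : List (List Char)) : List Int :=
  ((PySem.List.enumerate xs).filter (fun p => q p.2)).map Prod.fst

-- B's breaks / verse / words lets applied to the body after the header line
def pvWordsOf (body : List (List Char)) : List (List Char) :=
  let breaks := pvIdxs pvQB body
  let verse := match breaks with
    | [] => body
    | b :: _ => PySem.List.slice body none (some b)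
  (verse.filter pvKeep).flatMap pvF

def extract_opening_words_alt (lyrics : String) : String :=
  let stripped := (PySem.Chars.splitOn lyrics.toList "\n".toList).map PySem.Chars.strip
  let headers := pvIdxs pvQH stripped
  match headers with
  | [] => ""
  | i :: _ =>
    let body := PySem.List.slice stripped (some (i + 1)) none
    String.ofList (PySem.Chars.join [' '] (PySem.List.slice (pvWordsOf body) none (some 3)))

-- ===== PRECONDITION & SPEC =====
def Spec_extract_opening_words (lyrics : String) (out : String) : Prop := out = extract_opening_words_alt lyrics
instance (lyrics : String) (out : String) : Decidable (Spec_extract_opening_words lyrics out) := by unfold Spec_extract_opening_words; infer_instance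

-- ===== CLAIM (what is proved, stated in full; the proofs are below) =====
def Claim_equal_extract_opening_words : Prop := ∀ (lyrics : String), Dom_extract_opening_words lyrics → Spec_extract_opening_words lyrics (extract_opening_words lyrics)

-- ===== LEMMAS AND PROOFS =====

theorem slice3_eq_take (vw : List (List Char)) :
    PySem.List.slice vw none (some 3) = vw.take 3 := by
  simpa using PySem.List.slice_to vw (b := 3) (by norm_num)

-- A-side recursive collector (proof device): the words A accumulates once inside the verse
def pvCollect : List (List Char) → List (List Char)
  | [] => []
  | line :: rest =>
    let s := PySem.Chars.strip line
    if PySem.Chars.isIn "[Verse 1]".toList s then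
      pvCollect rest
    else if PySem.Chars.startswith s "[".toList && !(PySem.Chars.isIn "Verse".toList s) then
      []
    else if s ≠ [] && !(PySem.Chars.startswith s "[".toList) then
      PySem.Chars.split₀ (PySem.Chars.lower s) ++ pvCollect rest
    else
      pvCollect rest

theorem pvALoop_true (lines : List (List Char)) : ∀ vw : List (List Char),
    pvALoop lines vw true =
      String.ofList (PySem.Chars.join [' '] ((vw ++ pvCollect lines).take 3)) := by
  induction lines with
  | nil => intro vw; simp [pvALoop, pvCollect, slice3_eq_take]
  | cons line rest ih =>
    intro vw
    simp only [pvALoop, pvCollect]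
    by_cases h1 : PySem.Chars.isIn "[Verse 1]".toList (PySem.Chars.strip line) = true
    · rw [if_pos h1, if_pos h1, ih]
    · rw [if_neg h1, if_neg h1, if_pos trivial]
      by_cases h2 : (PySem.Chars.startswith (PySem.Chars.strip line) "[".toList &&
          !(PySem.Chars.isIn "Verse".toList (PySem.Chars.strip line))) = true
      · rw [if_pos h2, if_pos h2, slice3_eq_take, List.append_nil]
      · rw [if_neg h2, if_neg h2]
        by_cases h3 : (PySem.Chars.strip line ≠ [] &&
            !(PySem.Chars.startswith (PySem.Chars.strip line) "[".toList)) = true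
        · rw [if_pos h3, if_pos h3]
          by_cases h4 : 3 ≤ (vw ++ PySem.Chars.split₀ (PySem.Chars.lower (PySem.Chars.strip line))).length
          · rw [if_pos h4, slice3_eq_take, ← List.append_assoc, List.take_append_of_le_length h4]
          · rw [if_neg h4, ih, List.append_assoc]
        · rw [if_neg h3, if_neg h3, ih]

-- auxiliary recursive form of the enumerate comprehension
def pvIdxAux (q : List Char → Bool) : List (List Char) → List Int
  | [] => []
  | x :: xs => if q x then 0 :: (pvIdxAux q xs).map (· + 1) else (pvIdxAux q xs).map (· + 1)

theorem pvIdxs_shift (q : List Char → Bool) (xs : List (List Char)) : ∀ s : Int,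
    ((PySem.List.enumerate xs s).filter (fun p => q p.2)).map Prod.fst
      = (pvIdxAux q xs).map (· + s) := by
  induction xs with
  | nil => intro s; simp [pvIdxAux, PySem.List.enumerate_nil]
  | cons x xs ih =>
    intro s
    simp only [PySem.List.enumerate_cons, List.filter_cons, pvIdxAux]
    by_cases h : q x = true
    · simp only [h, if_pos, List.map_cons, ih (s + 1), List.map_map]
      rw [List.cons.injEq]
      refine ⟨by omega, ?_⟩
      apply List.map_congr_left; intro a _; simp; omega
    · simp only [h, Bool.false_eq_true, if_false, ih (s + 1), List.map_map]
      apply List.map_congr_left; intro a _; simp; omega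

theorem pvIdxs_eq_aux (q : List Char → Bool) (xs : List (List Char)) :
    pvIdxs q xs = pvIdxAux q xs := by
  have := pvIdxs_shift q xs 0
  simpa [pvIdxs] using this

theorem pvIdxs_cons (q : List Char → Bool) (x : List Char) (xs : List (List Char)) :
    pvIdxs q (x :: xs)
      = if q x then 0 :: (pvIdxs q xs).map (· + 1) else (pvIdxs q xs).map (· + 1) := by
  rw [pvIdxs_eq_aux, pvIdxs_eq_aux, pvIdxAux]

theorem pvIdxs_nonneg (q : List Char → Bool) (xs : List (List Char)) :
    ∀ i ∈ pvIdxs q xs, 0 ≤ i := by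
  induction xs with
  | nil => simp [pvIdxs, PySem.List.enumerate_nil]
  | cons x xs ih =>
    intro i hi
    rw [pvIdxs_cons] at hi
    by_cases h : q x = true
    · rw [if_pos h] at hi
      rcases List.mem_cons.mp hi with heq | hmem
      · omega
      · obtain ⟨j, hj, rfl⟩ := List.mem_map.mp hmem
        have := ih j hj; omega
    · rw [if_neg h] at hi
      obtain ⟨j, hj, rfl⟩ := List.mem_map.mp hi
      have := ih j hj; omega

theorem pvWordsOf_cons (x : List Char) (xs : List (List Char)) :
    pvWordsOf (x :: xs)
      = if pvQB x then []
        else if pvKeep x then pvF x ++ pvWordsOf xs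
        else pvWordsOf xs := by
  simp only [pvWordsOf, pvIdxs_cons]
  by_cases hb : pvQB x = true
  · rw [if_pos hb, if_pos hb]
    have : PySem.List.slice (x :: xs) none (some 0) = [] := by
      rw [PySem.List.slice_to _ (by norm_num)]; simp
    simp [this]
  · rw [if_neg hb, if_neg hb]
    cases hbs : pvIdxs pvQB xs with
    | nil =>
      simp only [List.map_nil, List.filter_cons]
      by_cases hk : pvKeep x = true <;> simp [hk]
    | cons b bs =>
      have hb0 : 0 ≤ b := pvIdxs_nonneg pvQB xs b (by rw [hbs]; exact List.mem_cons_self ..)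
      simp only [List.map_cons]
      have hsl : PySem.List.slice (x :: xs) none (some (b + 1))
          = x :: PySem.List.slice xs none (some b) := by
        rw [PySem.List.slice_to _ (by omega), PySem.List.slice_to _ hb0]
        have : (b + 1).toNat = b.toNat + 1 := by omega
        rw [this, List.take_succ_cons]
      rw [hsl]
      simp only [List.filter_cons]
      by_cases hk : pvKeep x = true <;> simp [hk]

theorem pvQH_imp_verse (s : List Char) (h : pvQH s = true) :
    PySem.Chars.isIn "Verse".toList s = true := by
  have h' : PySem.Chars.isIn "[Verse 1]".toList s = true := h
  rw [PySem.Chars.isIn_iff_infix] at h' ⊢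
  exact List.IsInfix.trans (by decide) h'

theorem pvCollect_eq (lines : List (List Char)) :
    pvCollect lines = pvWordsOf (lines.map PySem.Chars.strip) := by
  induction lines with
  | nil => simp [pvCollect, pvWordsOf, pvIdxs, PySem.List.enumerate_nil]
  | cons line rest ih =>
    simp only [pvCollect, List.map_cons, pvWordsOf_cons]
    by_cases h1 : PySem.Chars.isIn "[Verse 1]".toList (PySem.Chars.strip line) = true
    · rw [if_pos h1]
      have hv : PySem.Chars.isIn "Verse".toList (PySem.Chars.strip line) = true :=
        pvQH_imp_verse _ h1
      have hb : pvQB (PySem.Chars.strip line) = false := by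
        simp only [pvQB, hv, Bool.not_true, Bool.and_false]
      have hk : pvKeep (PySem.Chars.strip line) = false := by
        have h1' : pvQH (PySem.Chars.strip line) = true := h1
        simp only [pvKeep, h1', Bool.not_true, Bool.and_false]
      rw [if_neg (by simp [hb]), if_neg (by simp [hk]), ih]
    · rw [if_neg h1]
      by_cases h2 : (PySem.Chars.startswith (PySem.Chars.strip line) "[".toList &&
          !(PySem.Chars.isIn "Verse".toList (PySem.Chars.strip line))) = true
      · rw [if_pos h2, if_pos (show pvQB (PySem.Chars.strip line) = true from h2)]
      · rw [if_neg h2, if_neg (show ¬ pvQB (PySem.Chars.strip line) = true from h2)]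
        by_cases h3 : (PySem.Chars.strip line ≠ [] &&
            !(PySem.Chars.startswith (PySem.Chars.strip line) "[".toList)) = true
        · rw [if_pos h3]
          rw [Bool.and_eq_true] at h3
          have hne : PySem.Chars.strip line ≠ [] := by
            simpa using h3.1
          have hsw : PySem.Chars.startswith (PySem.Chars.strip line) "[".toList = false := by
            simpa using h3.2
          have hk : pvKeep (PySem.Chars.strip line) = true := by
            have h1' : pvQH (PySem.Chars.strip line) = false := by
              simpa using h1
            simp only [pvKeep, h1', hsw, Bool.not_false, Bool.and_true,
              Bool.not_eq_eq_eq_not]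
            simpa using hne
          rw [if_pos hk, ih]
          rfl
        · rw [if_neg h3]
          have hk : pvKeep (PySem.Chars.strip line) = false := by
            by_cases he : PySem.Chars.strip line = []
            · simp [pvKeep, he]
            · cases hsw : PySem.Chars.startswith (PySem.Chars.strip line) "[".toList with
              | false => exact absurd (by rw [hsw]; simp [he]) h3
              | true =>
                simp only [pvKeep, hsw, Bool.not_true, Bool.false_and, Bool.and_false]
          rw [if_neg (by simp [hk]), ih]

-- the seek phase: A's loop with the flag still false, against B's header-index pipeline
theorem pvSeek (lines : List (List Char)) :
    pvALoop lines [] false =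
      (match pvIdxs pvQH (lines.map PySem.Chars.strip) with
        | [] => ""
        | i :: _ => String.ofList (PySem.Chars.join [' ']
            ((pvWordsOf (PySem.List.slice (lines.map PySem.Chars.strip) (some (i + 1)) none)).take 3))) := by
  induction lines with
  | nil =>
    simp [pvALoop, pvIdxs, PySem.List.enumerate_nil, slice3_eq_take, PySem.Chars.join,
      List.intercalate]
  | cons line rest ih =>
    simp only [pvALoop, List.map_cons, pvIdxs_cons]
    by_cases h1 : PySem.Chars.isIn "[Verse 1]".toList (PySem.Chars.strip line) = true
    · rw [if_pos h1, if_pos (show pvQH (PySem.Chars.strip line) = true from h1)]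
      rw [pvALoop_true, pvCollect_eq]
      have hsl : PySem.List.slice (PySem.Chars.strip line :: rest.map PySem.Chars.strip)
          (some (1 : Int)) none = rest.map PySem.Chars.strip := by
        rw [PySem.List.slice_from _ (by norm_num)]; simp
      simp [hsl]
    · rw [if_neg h1, if_neg (show ¬ pvQH (PySem.Chars.strip line) = true from h1)]
      simp only [Bool.false_eq_true, if_false]
      rw [ih]
      cases hhs : pvIdxs pvQH (rest.map PySem.Chars.strip) with
      | nil => simp
      | cons h hs =>
        have h0 : 0 ≤ h := pvIdxs_nonneg pvQH _ h (by rw [hhs]; exact List.mem_cons_self ..)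
        have key : PySem.List.slice (PySem.Chars.strip line :: rest.map PySem.Chars.strip)
            (some (h + 1 + 1)) none
            = PySem.List.slice (rest.map PySem.Chars.strip) (some (h + 1)) none := by
          rw [PySem.List.slice_from _ (by omega), PySem.List.slice_from _ (by omega)]
          have hn : (h + 1 + 1).toNat = (h + 1).toNat + 1 := by omega
          rw [hn, List.drop_succ_cons]
        simp [key]

-- ===== VERDICT (by name: the statement is the Claim_ definition above) =====
theorem extract_opening_words_spec : Claim_equal_extract_opening_words := by
  intro lyrics _
  unfold Spec_extract_opening_words extract_opening_words
  dsimp only [extract_opening_words_alt]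
  rw [pvSeek]
  generalize (PySem.Chars.splitOn lyrics.toList "\n".toList).map PySem.Chars.strip = xs
  cases hc : pvIdxs pvQH xs with
  | nil => rfl
  | cons i is => dsimp only; rw [slice3_eq_take]
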